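-- pv_equiv track=rewrite | github.com/marticongost/woostproject | woostproject3.py | normalize_indent
-- ===== SOURCE A (Python) =====
-- def normalize_indent(string):
--     norm_lines = []
--     indent = None
--     found_content = False
--     for line in string.split("\n"):
--
--         # Drop empty lines before the first line with content
--         if not found_content:
--             if line.strip():
--                 found_content = True
--             else:
--                 continue
--
--         line = line.rstrip()
--         if indent is None:
--             norm_line = line.lstrip()
--             if norm_line != line:
--                 indent = line[:len(line) - len(norm_line)]
--             norm_lines.append(norm_line)
--         elif line.startswith(indent):
--             norm_lines.append(line[len(indent):])
--         else:
--             norm_lines.append(line)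
--     return "\n".join(norm_lines)
-- ===== SOURCE B (Python) =====
-- def normalize_indent(string):
--     # Phase 1: split, drop leading blank lines, rstrip the rest
--     lines = string.split("\n")
--     i = 0
--     while i < len(lines) and not lines[i].strip():
--         i += 1
--     kept = [line.rstrip() for line in lines[i:]]
--     # Phase 2: the first line with leading whitespace fixes the indent prefix
--     indent = None
--     for line in kept:
--         stripped = line.lstrip()
--         if stripped != line:
--             indent = line[:len(line) - len(stripped)]
--             break
--     if indent is None:
--         return "\n".join(kept)
--     # Phase 3: strip that prefix wherever it occurs
--     return "\n".join(
--         line[len(indent):] if line.startswith(indent) else line for line in kept)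
-- ===== Notes on version B (the rewrite author's own statement) =====
-- stated objective: simpler
-- what changed: Replaces the single stateful loop (found_content flag + mutable indent carried across iterations) by three independent phases: drop leading blank lines and rstrip, find the first indented line to fix the prefix, then map the prefix removal over all kept lines.
import Mathlib
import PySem

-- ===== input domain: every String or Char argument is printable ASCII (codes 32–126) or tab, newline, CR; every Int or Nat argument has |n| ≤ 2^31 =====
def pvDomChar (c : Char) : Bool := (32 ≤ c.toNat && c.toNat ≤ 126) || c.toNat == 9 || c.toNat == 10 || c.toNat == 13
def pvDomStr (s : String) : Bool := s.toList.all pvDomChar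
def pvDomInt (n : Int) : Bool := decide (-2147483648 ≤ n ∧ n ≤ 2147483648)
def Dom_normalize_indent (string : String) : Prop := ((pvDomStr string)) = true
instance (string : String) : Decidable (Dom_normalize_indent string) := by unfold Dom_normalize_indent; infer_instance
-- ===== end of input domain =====

-- B replaces A's single stateful loop (found_content/indent state) by three phases:
-- drop leading blanks + rstrip, find the indent prefix, map its removal; same values everywhere.

-- ===== PORT A =====
-- one loop iteration of A: state = (norm_lines, indent, found_content)
def niStep (st : List String × Option String × Bool) (line : String) :
    List String × Option String × Bool :=
  let (norm_lines, indent, found_content) := st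
  if found_content = false ∧ PySem.Str.strip line == "" then
    (norm_lines, indent, found_content)          -- "continue" on leading blank lines
  else
    let line := PySem.Str.rstrip line
    match indent with
    | none =>
      let norm_line := PySem.Str.lstrip line
      if norm_line ≠ line then
        (norm_lines ++ [norm_line],
         some (PySem.Str.slice line none
           (some ((PySem.Str.len line : Int) - (PySem.Str.len norm_line : Int)))), true)
      else
        (norm_lines ++ [norm_line], none, true)
    | some indent =>
      if PySem.Str.startswith line indent then
        (norm_lines ++ [PySem.Str.slice line (some (PySem.Str.len indent : Int)) none],
         some indent, true)
      else
        (norm_lines ++ [line], some indent, true)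

def normalize_indent (string : String) : String :=
  PySem.Str.join "\n"
    ((((PySem.Str.split? string "\n").getD []).foldl niStep ([], none, false)).1)

-- ===== PORT B =====
def normalize_indent_alt (string : String) : String :=
  -- phase 1: split, drop leading blank lines, rstrip the rest
  let kept := (((PySem.Str.split? string "\n").getD []).dropWhile
      (fun l => PySem.Str.strip l == "")).map PySem.Str.rstrip
  -- phase 2: the first line with leading whitespace fixes the indent prefix
  match kept.find? (fun l => PySem.Str.lstrip l != l) with
  | none => PySem.Str.join "\n" kept
  | some f =>
    let indent := PySem.Str.slice f none
      (some ((PySem.Str.len f : Int) - (PySem.Str.len (PySem.Str.lstrip f) : Int)))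
    -- phase 3: strip that prefix wherever it occurs
    PySem.Str.join "\n" (kept.map (fun k =>
      if PySem.Str.startswith k indent then
        PySem.Str.slice k (some (PySem.Str.len indent : Int)) none
      else k))

-- ===== PRECONDITION & SPEC =====
def Spec_normalize_indent (string : String) (out : String) : Prop := out = normalize_indent_alt string
instance (string : String) (out : String) : Decidable (Spec_normalize_indent string out) := by unfold Spec_normalize_indent; infer_instance

-- ===== CLAIM (what is proved, stated in full; the proofs are below) =====
def Claim_equal_normalize_indent : Prop := ∀ (string : String), Dom_normalize_indent string → Spec_normalize_indent string (normalize_indent string)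

-- ===== LEMMAS AND PROOFS =====

-- the indent prefix A records for line f (f already rstripped)
def mkInd (f : String) : String :=
  PySem.Str.slice f none
    (some ((PySem.Str.len f : Int) - (PySem.Str.len (PySem.Str.lstrip f) : Int)))

-- removal of a recorded indent from a line
def remInd (i k : String) : String :=
  if PySem.Str.startswith k i then PySem.Str.slice k (some (PySem.Str.len i : Int)) none else k

-- outputs of A's post-content loop on the (already rstripped) lines, by state
def goA : Option String → List String → List String
  | _, [] => []
  | none, k :: t =>
      if PySem.Str.lstrip k ≠ k then PySem.Str.lstrip k :: goA (some (mkInd k)) t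
      else PySem.Str.lstrip k :: goA none t
  | some i, k :: t => remInd i k :: goA (some i) t

-- B's output on the kept lines
def outB (ks : List String) : List String :=
  match ks.find? (fun l => PySem.Str.lstrip l != l) with
  | none => ks
  | some f => ks.map (remInd (mkInd f))


theorem lstrip_len_add (cs : List Char) :
    (cs.takeWhile PySem.Chars.isspace).length + (cs.dropWhile PySem.Chars.isspace).length
      = cs.length := by
  have h := congrArg List.length
    (List.takeWhile_append_dropWhile (p := PySem.Chars.isspace) (l := cs))
  rw [List.length_append] at h
  exact h

theorem toList_mkInd (f : String) :
    (mkInd f).toList = f.toList.takeWhile PySem.Chars.isspace := by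
  have hlen := lstrip_len_add f.toList
  have hb : ((PySem.Str.len f : Int) - (PySem.Str.len (PySem.Str.lstrip f) : Int))
      = ((f.toList.takeWhile PySem.Chars.isspace).length : Int) := by
    have h1 : PySem.Str.len f = f.toList.length := by simp
    have h2 : PySem.Str.len (PySem.Str.lstrip f)
        = (f.toList.dropWhile PySem.Chars.isspace).length := by
      have : (PySem.Str.lstrip f).toList = f.toList.dropWhile PySem.Chars.isspace := by
        rw [PySem.Str.toList_lstrip]; rfl
      simp [this]
    rw [h1, h2]; omega
  unfold mkInd
  rw [PySem.Str.toList_slice, PySem.Chars.slice_eq_listSlice, hb,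
    PySem.List.slice_to _ (by positivity)]
  rw [Int.toNat_natCast]
  nth_rewrite 2 [← List.takeWhile_append_dropWhile (p := PySem.Chars.isspace) (l := f.toList)]
  exact List.take_left

theorem mkInd_startswith (f : String) :
    PySem.Str.startswith f (mkInd f) = true := by
  rw [PySem.Str.startswith_eq, PySem.Chars.startswith_iff, toList_mkInd]
  exact List.takeWhile_prefix _

theorem mkInd_remove (f : String) :
    PySem.Str.slice f (some (PySem.Str.len (mkInd f) : Int)) none = PySem.Str.lstrip f := by
  apply String.toList_inj.mp
  rw [PySem.Str.toList_slice, PySem.Chars.slice_eq_listSlice, PySem.Str.toList_lstrip]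
  have h1 : (PySem.Str.len (mkInd f) : Int)
      = ((f.toList.takeWhile PySem.Chars.isspace).length : Int) := by
    have : PySem.Str.len (mkInd f) = (f.toList.takeWhile PySem.Chars.isspace).length := by
      simp [toList_mkInd]
    rw [this]
  rw [h1, PySem.List.slice_from _ (by positivity), Int.toNat_natCast]
  show List.drop _ f.toList = f.toList.dropWhile PySem.Chars.isspace
  nth_rewrite 2 [← List.takeWhile_append_dropWhile (p := PySem.Chars.isspace) (l := f.toList)]
  exact List.drop_left

theorem lstrip_toList_ne (f : String) (hf : PySem.Str.lstrip f ≠ f) :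
    f.toList.dropWhile PySem.Chars.isspace ≠ f.toList := by
  intro h
  apply hf
  apply String.toList_inj.mp
  rw [PySem.Str.toList_lstrip]
  exact h

theorem startswith_mkInd_false (k f : String) (hk : PySem.Str.lstrip k = k)
    (hf : PySem.Str.lstrip f ≠ f) : PySem.Str.startswith k (mkInd f) = false := by
  by_contra hsw
  have hsw : PySem.Str.startswith k (mkInd f) = true := by
    revert hsw; cases PySem.Str.startswith k (mkInd f) <;> simp
  rw [PySem.Str.startswith_eq, PySem.Chars.startswith_iff, toList_mkInd] at hsw
  have hne := lstrip_toList_ne f hf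
  have hkeq : k.toList.dropWhile PySem.Chars.isspace = k.toList := by
    conv_rhs => rw [← hk]
    rw [PySem.Str.toList_lstrip]
    rfl
  cases hc : f.toList with
  | nil => exact hne (by rw [hc]; rfl)
  | cons c rest =>
    by_cases hcs : PySem.Chars.isspace c = true
    · rw [hc, List.takeWhile_cons_of_pos hcs] at hsw
      obtain ⟨t2, ht⟩ := hsw
      have hkc : k.toList = c :: ((rest.takeWhile PySem.Chars.isspace) ++ t2) := by
        rw [← ht]; simp
      rw [hkc, List.dropWhile_cons_of_pos hcs] at hkeq
      have hlen2 := congrArg List.length hkeq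
      rw [List.length_cons] at hlen2
      have hle : (List.dropWhile PySem.Chars.isspace
          ((rest.takeWhile PySem.Chars.isspace) ++ t2)).length
          ≤ ((rest.takeWhile PySem.Chars.isspace) ++ t2).length :=
        List.length_dropWhile_le _ _
      omega
    · apply hne
      rw [hc, List.dropWhile_cons_of_neg hcs]

theorem remInd_mkInd_self (f : String) :
    remInd (mkInd f) f = PySem.Str.lstrip f := by
  unfold remInd
  rw [mkInd_startswith f, if_pos rfl, mkInd_remove]

theorem goA_some (i : String) (ks : List String) : goA (some i) ks = ks.map (remInd i) := by
  induction ks with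
  | nil => rfl
  | cons k t ih => rw [goA, ih]; rfl

theorem goA_none (ks : List String) : goA none ks = outB ks := by
  induction ks with
  | nil => rfl
  | cons k t ih =>
    by_cases hk : PySem.Str.lstrip k = k
    · have h1 : goA none (k :: t) = PySem.Str.lstrip k :: goA none t := by
        rw [goA]; rw [if_neg (by simp [hk])]
      rw [h1, ih]
      unfold outB
      rw [List.find?_cons_of_neg (by simp [hk])]
      cases hfind : List.find? (fun l => PySem.Str.lstrip l != l) t with
      | none => rw [hk]
      | some f =>
        have hfp : PySem.Str.lstrip f ≠ f := by
          have := List.find?_some hfind; simpa using this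
        have hkr : remInd (mkInd f) k = k := by
          unfold remInd
          rw [startswith_mkInd_false k f hk hfp]
          exact if_neg (by simp)
        dsimp only
        rw [List.map_cons, hk, hkr]
    · have h1 : goA none (k :: t)
          = PySem.Str.lstrip k :: goA (some (mkInd k)) t := by
        rw [goA]; rw [if_pos hk]
      rw [h1, goA_some]
      unfold outB
      rw [List.find?_cons_of_pos (by simp [hk])]
      dsimp only
      rw [List.map_cons, remInd_mkInd_self k]

theorem niStep_true (acc : List String) (ind : Option String) (l : String) :
    niStep (acc, ind, true) l =
      match ind with
      | none =>
        if PySem.Str.lstrip (PySem.Str.rstrip l) ≠ PySem.Str.rstrip l then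
          (acc ++ [PySem.Str.lstrip (PySem.Str.rstrip l)],
           some (mkInd (PySem.Str.rstrip l)), true)
        else (acc ++ [PySem.Str.lstrip (PySem.Str.rstrip l)], none, true)
      | some i => (acc ++ [remInd i (PySem.Str.rstrip l)], some i, true) := by
  unfold niStep remInd mkInd
  dsimp only
  rw [if_neg (by simp)]
  cases ind with
  | none => dsimp only
  | some i =>
    dsimp only
    split_ifs <;> rfl

theorem foldl_niStep_true (ls : List String) (acc : List String) (ind : Option String) :
    (ls.foldl niStep (acc, ind, true)).1 = acc ++ goA ind (ls.map PySem.Str.rstrip) := by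
  induction ls generalizing acc ind with
  | nil => simp [goA]
  | cons l t ih =>
    rw [List.foldl_cons, niStep_true, List.map_cons]
    cases ind with
    | none =>
      by_cases hn : PySem.Str.lstrip (PySem.Str.rstrip l) ≠ PySem.Str.rstrip l
      · rw [if_pos hn, ih, goA, if_pos hn, List.append_assoc]; rfl
      · rw [if_neg hn, ih, goA, if_neg hn, List.append_assoc]; rfl
    | some i => rw [ih, goA, List.append_assoc]; rfl

theorem niStep_false_nonblank (acc : List String) (ind : Option String) (l : String)
    (hl : (PySem.Str.strip l == "") = false) :
    niStep (acc, ind, false) l = niStep (acc, ind, true) l := by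
  unfold niStep
  dsimp only
  conv_lhs => rw [if_neg (show ¬(false = false ∧ (PySem.Str.strip l == "") = true) by
    simp [hl])]
  conv_rhs => rw [if_neg (show ¬(true = false ∧ (PySem.Str.strip l == "") = true) by simp)]

theorem foldl_niStep_skip (ls : List String) :
    ls.foldl niStep ([], none, false)
      = (ls.dropWhile (fun l => PySem.Str.strip l == "")).foldl niStep ([], none, false) := by
  induction ls with
  | nil => rfl
  | cons l t ih =>
    by_cases hb : (PySem.Str.strip l == "") = true
    · rw [List.dropWhile_cons_of_pos (p := fun l => PySem.Str.strip l == "") hb,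
        List.foldl_cons, ← ih]
      congr 1
      unfold niStep
      dsimp only
      rw [if_pos ⟨rfl, hb⟩]
    · rw [List.dropWhile_cons_of_neg (p := fun l => PySem.Str.strip l == "") hb]

-- ===== VERDICT (by name: the statement is the Claim_ definition above) =====
theorem normalize_indent_spec : Claim_equal_normalize_indent := by
  intro string _
  unfold Spec_normalize_indent normalize_indent normalize_indent_alt
  dsimp only
  rw [foldl_niStep_skip]
  cases hd : ((PySem.Str.split? string "\n").getD []).dropWhile
      (fun l => PySem.Str.strip l == "") with
  | nil => rfl
  | cons h t =>
    have hh : (PySem.Str.strip h == "") = false := by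
      have := List.head_dropWhile_not (fun l => PySem.Str.strip l == "")
        (l := (PySem.Str.split? string "\n").getD []) (by simp [hd])
      simpa [hd] using this
    rw [List.foldl_cons, niStep_false_nonblank [] none h hh, ← List.foldl_cons,
      foldl_niStep_true, List.nil_append, goA_none]
    unfold outB
    cases List.find? (fun l => PySem.Str.lstrip l != l)
        ((h :: t).map PySem.Str.rstrip) <;> rfl
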